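-- pv_equiv track=rewrite | github.com/karshav16/Adobe-India-Hackathon | pdf_adobe_1a-main/pdf_adobe_1a-main/pdf_outline/app/outline_formatter.py | _ensure_proper_hierarchy
-- ===== SOURCE A (Python) =====
-- from typing import List, Dict, Any
--
-- def _ensure_proper_hierarchy(outline: List[Dict[str, Any]]) -> List[Dict[str, Any]]:
--     """Ensure proper heading hierarchy (H1 -> H2 -> H3)"""
--     if not outline:
--         return []
--
--     corrected = []
--     current_levels = {"H1": False, "H2": False, "H3": False}
--
--     for item in outline:
--         level = item["level"]
--
--         # Hierarchy correction logic
--         if level == "H1":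
--             # H1 is always allowed
--             current_levels = {"H1": True, "H2": False, "H3": False}
--             corrected.append(item)
--
--         elif level == "H2":
--             # H2 requires H1 to exist
--             if not current_levels["H1"]:
--                 # Promote to H1
--                 item = {**item, "level": "H1"}
--                 current_levels = {"H1": True, "H2": False, "H3": False}
--             else:
--                 current_levels["H2"] = True
--                 current_levels["H3"] = False
--             corrected.append(item)
--
--         elif level == "H3":
--             # H3 requires H2 to exist
--             if not current_levels["H2"]:
--                 if not current_levels["H1"]:
--                     # Promote to H1
--                     item = {**item, "level": "H1"}
--                     current_levels = {"H1": True, "H2": False, "H3": False}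
--                 else:
--                     # Promote to H2
--                     item = {**item, "level": "H2"}
--                     current_levels["H2"] = True
--                     current_levels["H3"] = False
--             else:
--                 current_levels["H3"] = True
--             corrected.append(item)
--
--     return corrected
-- ===== SOURCE B (Python) =====
-- def _ensure_proper_hierarchy(outline):
--     """Ensure proper heading hierarchy (H1 -> H2 -> H3)"""
--     if not outline:
--         return []
--     num = {"H1": 1, "H2": 2, "H3": 3}
--     name = {1: "H1", 2: "H2", 3: "H3"}
--     corrected = []
--     depth = 0
--     for item in outline:
--         n = num.get(item["level"])
--         if n is None:
--             continue
--         new = min(n, depth + 1)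
--         depth = new
--         corrected.append(item if new == n else {**item, "level": name[new]})
--     return corrected
-- ===== Notes on version B (the rewrite author's own statement) =====
-- stated objective: simpler
-- what changed: Replaces A's three-boolean current_levels dictionary and its nested promote-to-H1/H2 branch ladder by a single integer depth with new = min(level_number, depth + 1), copying the item with the renamed level only when new differs.
import Mathlib
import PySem

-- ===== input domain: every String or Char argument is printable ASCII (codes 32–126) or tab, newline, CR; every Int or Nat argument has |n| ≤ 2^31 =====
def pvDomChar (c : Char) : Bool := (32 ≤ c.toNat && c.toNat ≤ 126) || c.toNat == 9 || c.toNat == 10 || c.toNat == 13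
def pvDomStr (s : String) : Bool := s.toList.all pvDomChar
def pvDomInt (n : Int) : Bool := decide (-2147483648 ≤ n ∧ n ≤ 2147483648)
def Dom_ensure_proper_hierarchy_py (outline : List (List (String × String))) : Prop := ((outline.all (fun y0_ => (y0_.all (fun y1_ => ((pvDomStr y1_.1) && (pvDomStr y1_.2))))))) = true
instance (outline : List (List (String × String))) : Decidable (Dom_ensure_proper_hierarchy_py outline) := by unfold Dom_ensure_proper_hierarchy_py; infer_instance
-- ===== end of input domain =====

-- B replaces A's three-boolean state dictionary and branch ladder by a single integer
-- depth with new = min(level, depth + 1); same return value (simpler, no speed claim).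

-- ===== PORT A =====
-- one loop iteration of A: branch ladder over item["level"] with the current_levels dict
def pvStepA (st : List (List (String × String)) × PySem.Dict String Bool)
    (item : List (String × String)) :
    List (List (String × String)) × PySem.Dict String Bool :=
  match (PySem.Dict.mk item).get? "level" with
  | none => st  -- Python raises KeyError here; such inputs are excluded by Pre_
  | some level =>
    if level = "H1" then
      (st.1 ++ [item], PySem.Dict.ofList [("H1", true), ("H2", false), ("H3", false)])
    else if level = "H2" then
      if (st.2.getD "H1" false) = false then
        (st.1 ++ [((PySem.Dict.mk item).insert "level" "H1").items],
         PySem.Dict.ofList [("H1", true), ("H2", false), ("H3", false)])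
      else
        (st.1 ++ [item], (st.2.insert "H2" true).insert "H3" false)
    else if level = "H3" then
      if (st.2.getD "H2" false) = false then
        if (st.2.getD "H1" false) = false then
          (st.1 ++ [((PySem.Dict.mk item).insert "level" "H1").items],
           PySem.Dict.ofList [("H1", true), ("H2", false), ("H3", false)])
        else
          (st.1 ++ [((PySem.Dict.mk item).insert "level" "H2").items],
           (st.2.insert "H2" true).insert "H3" false)
      else
        (st.1 ++ [item], st.2.insert "H3" true)
    else st  -- level not H1/H2/H3: A appends nothing

def ensure_proper_hierarchy_py (outline : List (List (String × String))) :
    List (List (String × String)) :=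
  if outline = [] then []
  else (outline.foldl pvStepA
    ([], PySem.Dict.ofList [("H1", false), ("H2", false), ("H3", false)])).1

-- ===== PORT B =====
-- num.get(item["level"]) on the literal mapping dict
def pvLevelNum (s : String) : Option Int :=
  (PySem.Dict.ofList [("H1", (1 : Int)), ("H2", 2), ("H3", 3)]).get? s

-- name[new]; new is always 1, 2 or 3 so the KeyError branch is unreachable
def pvLevelName (n : Int) : String :=
  ((PySem.Dict.ofList [((1 : Int), "H1"), (2, "H2"), (3, "H3")]).get? n).getD ""

-- one loop iteration of B: new = min(n, depth + 1)
def pvStepB (st : List (List (String × String)) × Int)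
    (item : List (String × String)) :
    List (List (String × String)) × Int :=
  match (PySem.Dict.mk item).get? "level" with
  | none => st  -- Python raises KeyError here; excluded by Pre_
  | some lvl =>
    match pvLevelNum lvl with
    | none => st
    | some n =>
      let nw := min n (st.2 + 1)
      (st.1 ++ [if nw = n then item
                else ((PySem.Dict.mk item).insert "level" (pvLevelName nw)).items], nw)

def ensure_proper_hierarchy_py_alt (outline : List (List (String × String))) :
    List (List (String × String)) :=
  if outline = [] then []
  else (outline.foldl pvStepB ([], 0)).1

-- ===== PRECONDITION & SPEC =====
-- Pre_ excludes exactly the inputs on which Python A raises KeyError: an item without a "level" key.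
def Pre_ensure_proper_hierarchy_py (outline : List (List (String × String))) : Prop :=
  ∀ item ∈ outline, ((PySem.Dict.mk item).get? "level").isSome = true
instance (outline : List (List (String × String))) : Decidable (Pre_ensure_proper_hierarchy_py outline) := by unfold Pre_ensure_proper_hierarchy_py; infer_instance

def pvWitness_ensure_proper_hierarchy_py : (List (List (String × String))) :=
  [[("level", "H3"), ("text", "intro")], [("level", "H2"), ("text", "body")]]

def Spec_ensure_proper_hierarchy_py (outline : List (List (String × String))) (out : List (List (String × String))) : Prop := out = ensure_proper_hierarchy_py_alt outline
instance (outline : List (List (String × String))) (out : List (List (String × String))) : Decidable (Spec_ensure_proper_hierarchy_py outline out) := by unfold Spec_ensure_proper_hierarchy_py; infer_instance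

-- ===== CLAIM (what is proved, stated in full; the proofs are below) =====
def Claim_equal_ensure_proper_hierarchy_py : Prop := ∀ (outline : List (List (String × String))), Dom_ensure_proper_hierarchy_py outline → Pre_ensure_proper_hierarchy_py outline → Spec_ensure_proper_hierarchy_py outline (ensure_proper_hierarchy_py outline)

-- ===== LEMMAS AND PROOFS =====

-- A's current_levels dict takes only four values; they correspond to B's depth 0..3.
def pvRel (cl : PySem.Dict String Bool) (d : Int) : Prop :=
  (cl = PySem.Dict.ofList [("H1", false), ("H2", false), ("H3", false)] ∧ d = 0) ∨
  (cl = PySem.Dict.ofList [("H1", true), ("H2", false), ("H3", false)] ∧ d = 1) ∨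
  (cl = PySem.Dict.ofList [("H1", true), ("H2", true), ("H3", false)] ∧ d = 2) ∨
  (cl = PySem.Dict.ofList [("H1", true), ("H2", true), ("H3", true)] ∧ d = 3)

theorem pvLevelNum_eq_none (lvl : String) (h1 : lvl ≠ "H1") (h2 : lvl ≠ "H2")
    (h3 : lvl ≠ "H3") : pvLevelNum lvl = none := by
  simp only [pvLevelNum, PySem.Dict.get?, List.find?_eq_none, Option.map_eq_none_iff]
  intro p hp
  have hitems : (PySem.Dict.ofList [("H1", (1 : Int)), ("H2", 2), ("H3", 3)]).items
      = [("H1", 1), ("H2", 2), ("H3", 3)] := rfl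
  rw [hitems] at hp
  simp only [List.mem_cons, List.not_mem_nil, or_false] at hp
  rcases hp with rfl | rfl | rfl <;> simp [Ne.symm h1, Ne.symm h2, Ne.symm h3]

theorem pvFold_eq (l : List (List (String × String))) :
    ∀ (acc : List (List (String × String))) (cl : PySem.Dict String Bool) (d : Int),
    pvRel cl d → (l.foldl pvStepA (acc, cl)).1 = (l.foldl pvStepB (acc, d)).1 := by
  induction l with
  | nil => intro acc cl d _; simp
  | cons a l ih =>
    intro acc cl d hrel
    simp only [List.foldl_cons]
    rcases hget : (PySem.Dict.mk a).get? "level" with _ | lvl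
    · simp only [pvStepA, pvStepB, hget]
      exact ih _ _ _ hrel
    · rcases hrel with ⟨rfl, rfl⟩ | ⟨rfl, rfl⟩ | ⟨rfl, rfl⟩ | ⟨rfl, rfl⟩ <;>
      · by_cases h1 : lvl = "H1"
        · subst h1
          simp only [pvStepA, pvStepB, hget, pvLevelNum, pvLevelName]
          norm_num
          apply ih
          unfold pvRel; tauto
        · by_cases h2 : lvl = "H2"
          · subst h2
            simp only [pvStepA, pvStepB, hget, pvLevelNum, pvLevelName]
            norm_num
            apply ih
            unfold pvRel; tauto
          · by_cases h3 : lvl = "H3"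
            · subst h3
              simp only [pvStepA, pvStepB, hget, pvLevelNum, pvLevelName]
              norm_num
              apply ih
              unfold pvRel; tauto
            · simp only [pvStepA, pvStepB, hget, pvLevelNum_eq_none lvl h1 h2 h3,
                if_neg h1, if_neg h2, if_neg h3]
              apply ih
              unfold pvRel; tauto

-- ===== VERDICT (by name: the statement is the Claim_ definition above) =====
theorem ensure_proper_hierarchy_py_spec : Claim_equal_ensure_proper_hierarchy_py := by
  intro outline _ _
  unfold Spec_ensure_proper_hierarchy_py ensure_proper_hierarchy_py ensure_proper_hierarchy_py_alt
  split
  · rfl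
  · exact pvFold_eq outline [] _ 0 (Or.inl ⟨rfl, rfl⟩)
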